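-- pv_equiv track=rewrite | github.com/JIKMAN/Algorithm | coding_test/20211113_test.py | solution
-- ===== SOURCE A (Python) =====
-- def solution(S):
--     new = []
--     tmp = S[0]
--     now = S[0]
--     for i in range(1, len(S)):
--         if S[i] != now:
--             new.append(tmp)
--             tmp = S[i]
--             now = S[i]
--         else:
--             tmp += S[i]
--     if tmp:
--         new.append(tmp)
--
--     max_leng = len(max(new, key=len))
--
--     cnt = 0
--     for w in new:
--         while len(w) < max_leng:
--             w += w[0]
--             cnt += 1
--     return cnt
-- ===== SOURCE B (Python) =====
-- def solution(S):
--     # Single pass: track longest run, number of runs, current run length.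
--     # Answer = max_run_len * num_runs - len(S).
--     max_len = 0
--     runs = 0
--     cur = 0
--     prev = None
--     for ch in S:
--         if prev == ch:
--             cur += 1
--         else:
--             runs += 1
--             cur = 1
--             prev = ch
--         if cur > max_len:
--             max_len = cur
--     return max_len * runs - len(S)
-- ===== Notes on version B (the rewrite author's own statement) =====
-- stated objective: faster
-- what changed: B replaces A's run-list construction plus per-run character-by-character padding loop with a single pass that tracks the number of runs, the current run length and the maximum run length, returning max_run*runs - len(S).
import Mathlib
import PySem

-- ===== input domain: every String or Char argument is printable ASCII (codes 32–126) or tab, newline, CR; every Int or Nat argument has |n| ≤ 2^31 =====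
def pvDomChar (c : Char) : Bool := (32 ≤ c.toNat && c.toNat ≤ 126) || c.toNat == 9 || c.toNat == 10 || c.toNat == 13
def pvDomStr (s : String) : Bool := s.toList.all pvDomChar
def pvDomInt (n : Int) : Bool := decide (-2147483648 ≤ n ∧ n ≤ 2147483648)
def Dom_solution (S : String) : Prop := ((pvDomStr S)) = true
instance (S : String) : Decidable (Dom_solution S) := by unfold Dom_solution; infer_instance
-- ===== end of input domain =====

-- B: single pass tracking (max run length, number of runs) and returns max*runs - len(S),
-- replacing A's run-list construction and per-run character padding loop (objective: faster).


-- ===== PORT A =====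
-- A's main character loop: state (new, tmp, now); for S[i]: if S[i] != now, flush tmp.
def solutionStepA (st : List (List Char) × List Char × Char) (c : Char) :
    List (List Char) × List Char × Char :=
  match st with
  | (new, tmp, now) =>
    if c ≠ now then (new ++ [tmp], [c], c) else (new, tmp ++ [c], now)

-- A's inner while loop: 'while len(w) < max_leng: w += w[0]; cnt += 1'.
-- (w[0] on an empty w would be an IndexError in Python; that branch is unreachable
-- since every run is nonempty, so headD is exact here.)
def solutionPad (m : Nat) (w : List Char) (cnt : Int) : Int :=
  if w.length < m then solutionPad m (w ++ [w.headD ' ']) (cnt + 1) else cnt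
termination_by m - w.length
decreasing_by simp_all; omega

def solution (S : String) : Int :=
  match S.toList with
  | [] => 0   -- S[0] raises IndexError; excluded by Pre_solution
  | c0 :: rest =>
    let st := rest.foldl solutionStepA ([], [c0], c0)
    let new := if st.2.1 ≠ [] then st.1 ++ [st.2.1] else st.1
    match PySem.List.max? new (fun w => w.length) with
    | none => 0   -- max() on an empty sequence raises ValueError; unreachable
    | some m =>
      let maxLeng := m.length
      new.foldl (fun cnt w => solutionPad maxLeng w cnt) 0

-- ===== PORT B =====
-- B's single-pass state: (max_len, runs, cur, prev).
def solutionStepB (st : Nat × Nat × Nat × Option Char) (c : Char) :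
    Nat × Nat × Nat × Option Char :=
  match st with
  | (maxLen, runs, cur, prev) =>
    let runs' := if prev = some c then runs else runs + 1
    let cur'  := if prev = some c then cur + 1 else 1
    let prev' := if prev = some c then prev else some c
    (if cur' > maxLen then cur' else maxLen, runs', cur', prev')

def solution_alt (S : String) : Int :=
  let st := S.toList.foldl solutionStepB (0, 0, 0, none)
  (st.1 : Int) * (st.2.1 : Int) - (PySem.Str.len S : Int)

-- ===== PRECONDITION & SPEC =====
-- Pre_ excludes only the empty string, on which A raises IndexError at S[0].
def Pre_solution (S : String) : Prop := S ≠ ""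
instance (S : String) : Decidable (Pre_solution S) := by unfold Pre_solution; infer_instance
def pvWitness_solution : String := "aab"

def Spec_solution (S : String) (out : Int) : Prop := out = solution_alt S
instance (S : String) (out : Int) : Decidable (Spec_solution S out) := by unfold Spec_solution; infer_instance

-- ===== CLAIM (what is proved, stated in full; the proofs are below) =====
def Claim_equal_solution : Prop := ∀ (S : String), Dom_solution S → Pre_solution S → Spec_solution S (solution S)

-- ===== LEMMAS AND PROOFS =====

-- max of a list of Nats (with 0 default)
def natMax (l : List Nat) : Nat := l.foldr max 0

theorem natMax_nil : natMax [] = 0 := rfl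
theorem natMax_cons (a : Nat) (l : List Nat) : natMax (a :: l) = max a (natMax l) := rfl
theorem natMax_append (l₁ l₂ : List Nat) : natMax (l₁ ++ l₂) = max (natMax l₁) (natMax l₂) := by
  induction l₁ with
  | nil => simp [natMax]
  | cons a t ih => simp [natMax_cons, ih, Nat.max_assoc]

theorem le_natMax {l : List Nat} {x : Nat} (h : x ∈ l) : x ≤ natMax l := by
  induction l with
  | nil => cases h
  | cons a t ih =>
    rcases List.mem_cons.mp h with rfl | h'
    · simp [natMax_cons]
    · exact le_trans (ih h') (by simp [natMax_cons])

theorem natMax_mem {l : List Nat} (h : l ≠ []) : natMax l ∈ l := by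
  induction l with
  | nil => exact absurd rfl h
  | cons a t ih =>
    cases t with
    | nil => simp [natMax]
    | cons b u =>
      rw [natMax_cons]
      by_cases hle : a ≤ natMax (b :: u)
      · rw [Nat.max_eq_right hle]; exact List.mem_cons_of_mem _ (ih (by simp))
      · rw [Nat.max_eq_left (Nat.le_of_not_le hle)]; exact List.mem_cons_self

-- key of max?-element is the max of the keys
theorem max?_key_eq_natMax (xs : List (List Char)) (m : List Char)
    (h : PySem.List.max? xs (fun w => w.length) = some m) :
    m.length = natMax (xs.map List.length) := by
  have hmem : m ∈ xs := PySem.List.max?_mem h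
  have hmax := PySem.List.max?_isMax h
  have h1 : m.length ≤ natMax (xs.map List.length) :=
    le_natMax (List.mem_map_of_mem hmem)
  have hne : xs.map List.length ≠ [] := by
    intro hc; rw [List.map_eq_nil_iff] at hc; subst hc; cases hmem
  have h2 : natMax (xs.map List.length) ∈ xs.map List.length := natMax_mem hne
  rcases List.mem_map.mp h2 with ⟨y, hy, hyl⟩
  have h3 : y.length ≤ m.length := hmax y hy
  omega

-- invariant relation between A's and B's loop states
def SRel (a : List (List Char) × List Char × Char) (b : Nat × Nat × Nat × Option Char) : Prop :=
  b.2.2.2 = some a.2.2 ∧ b.2.2.1 = a.2.1.length ∧ b.2.1 = a.1.length + 1 ∧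
  b.1 = natMax (a.1.map List.length ++ [a.2.1.length]) ∧ a.2.1 ≠ []

theorem SRel_step {a b} (c : Char) (h : SRel a b) : SRel (solutionStepA a c) (solutionStepB b c) := by
  obtain ⟨new, tmp, now⟩ := a
  obtain ⟨maxL, runs, cur, prev⟩ := b
  obtain ⟨h1, h2, h3, h4, h5⟩ := h
  simp only at h1 h2 h3 h4 h5
  have htmp : 0 < tmp.length := List.length_pos_iff.mpr h5
  subst h1 h2 h3 h4
  by_cases hc : c = now
  · subst hc
    have eA : solutionStepA (new, tmp, c) c = (new, tmp ++ [c], c) := by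
      simp [solutionStepA]
    have eB : solutionStepB (natMax (new.map List.length ++ [tmp.length]),
        new.length + 1, tmp.length, some c) c
        = (if tmp.length + 1 > natMax (new.map List.length ++ [tmp.length])
            then tmp.length + 1 else natMax (new.map List.length ++ [tmp.length]),
           new.length + 1, tmp.length + 1, some c) := by
      simp [solutionStepB]
    rw [eA, eB]
    refine ⟨rfl, by simp, rfl, ?_, by simp⟩
    simp only [List.length_append, List.length_singleton, natMax_append, natMax_cons,
      natMax_nil, gt_iff_lt]
    split_ifs <;> omega
  · have hps : ¬ ((some now : Option Char) = some c) := fun hx => hc (Option.some.inj hx).symm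
    have eA : solutionStepA (new, tmp, now) c = (new ++ [tmp], [c], c) := by
      simp [solutionStepA, hc]
    have eB : solutionStepB (natMax (new.map List.length ++ [tmp.length]),
        new.length + 1, tmp.length, some now) c
        = (if 1 > natMax (new.map List.length ++ [tmp.length])
            then 1 else natMax (new.map List.length ++ [tmp.length]),
           new.length + 2, 1, some c) := by
      simp [solutionStepB, hps]
    rw [eA, eB]
    refine ⟨rfl, by simp, by simp, ?_, by simp⟩
    simp only [List.map_append, List.map_cons, List.map_nil, natMax_append, natMax_cons,
      natMax_nil, List.length_singleton, gt_iff_lt]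
    split_ifs <;> omega

theorem SRel_foldl (l : List Char) {a b} (h : SRel a b) :
    SRel (l.foldl solutionStepA a) (l.foldl solutionStepB b) := by
  induction l generalizing a b with
  | nil => exact h
  | cons c t ih => exact ih (SRel_step c h)

-- A's loop flattens back to the input
theorem stepA_flatten (l : List Char) (new : List (List Char)) (tmp : List Char) (now : Char) :
    ((l.foldl solutionStepA (new, tmp, now)).1).flatten ++ (l.foldl solutionStepA (new, tmp, now)).2.1
      = new.flatten ++ tmp ++ l := by
  induction l generalizing new tmp now with
  | nil => simp
  | cons c t ih =>
    simp only [List.foldl_cons, solutionStepA]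
    by_cases hc : c = now
    · subst hc
      simp only [ne_eq, not_true_eq_false, if_false]
      rw [ih]; simp
    · simp only [ne_eq, hc, not_false_eq_true, if_true]
      rw [ih]; simp

-- pad adds (m - len w)
theorem solutionPad_eq (m : Nat) (w : List Char) (cnt : Int) :
    solutionPad m w cnt = cnt + ((m - w.length : Nat) : Int) := by
  fun_induction solutionPad m w cnt with
  | case1 w cnt h ih => rw [ih]; simp; omega
  | case2 w cnt h => simp; omega

-- the pad fold sums the deficits
theorem pad_foldl (new : List (List Char)) (m : Nat) (cnt : Int) :
    new.foldl (fun cnt w => solutionPad m w cnt) cnt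
      = cnt + (((new.map (fun w => m - w.length)).sum : Nat) : Int) := by
  induction new generalizing cnt with
  | nil => simp
  | cons a t ih =>
    rw [List.foldl_cons, solutionPad_eq, ih, List.map_cons, List.sum_cons]
    push_cast; ring

-- sum of deficits = m * count - total length, when every length ≤ m
theorem deficit_sum (new : List (List Char)) (m : Nat)
    (h : ∀ w ∈ new, w.length ≤ m) :
    (((new.map (fun w => m - w.length)).sum : Nat) : Int)
      = (m : Int) * new.length - ((new.map List.length).sum : Nat) := by
  induction new with
  | nil => simp
  | cons a t ih =>
    have ha : a.length ≤ m := h a List.mem_cons_self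
    have ht := ih (fun w hw => h w (List.mem_cons_of_mem _ hw))
    simp only [List.map_cons, List.sum_cons, List.length_cons]
    push_cast
    push_cast at ht
    rw [ht]; ring_nf; omega

theorem solution_eq (S : String) (hpre : S ≠ "") : solution S = solution_alt S := by
  rcases hS : S.toList with _ | ⟨c0, rest⟩
  · exact absurd (by simp_all) hpre
  · have hinit : SRel ([], [c0], c0) (solutionStepB (0, 0, 0, none) c0) := by
      simp [SRel, solutionStepB, natMax]
    have hrel := SRel_foldl rest hinit
    set stA := rest.foldl solutionStepA ([], [c0], c0) with hstA
    set stB := rest.foldl solutionStepB (solutionStepB (0, 0, 0, none) c0) with hstB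
    obtain ⟨hprev, hcur, hruns, hmaxL, htmp⟩ := hrel
    -- the final run list of A
    set new2 : List (List Char) := stA.1 ++ [stA.2.1] with hnew2
    have hnew2ne : new2 ≠ [] := by simp [hnew2]
    -- flatten = input
    have hflat : new2.flatten ++ [] = [c0] ++ rest := by
      simp only [hnew2, List.flatten_append, List.flatten_cons, List.flatten_nil,
        List.append_nil]
      simpa using stepA_flatten rest [] [c0] c0
    have hsum : (new2.map List.length).sum = rest.length + 1 := by
      have h2 := congrArg List.length hflat
      simp [List.length_flatten] at h2
      omega
    -- A's value
    have hmaxs : PySem.List.max? new2 (fun w => w.length) ≠ none := by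
      rw [Ne, PySem.List.max?_eq_none_iff]; exact hnew2ne
    rcases hm : PySem.List.max? new2 (fun w => w.length) with _ | m
    · exact absurd hm hmaxs
    have hkey : m.length = natMax (new2.map List.length) := max?_key_eq_natMax _ _ hm
    have hle : ∀ w ∈ new2, w.length ≤ m.length := by
      intro w hw
      rw [hkey]; exact le_natMax (List.mem_map_of_mem hw)
    have hA : solution S = (m.length : Int) * new2.length - ((new2.map List.length).sum : Nat) := by
      simp only [solution, hS, ← hstA, if_pos (by simpa using htmp), ← hnew2, hm]
      rw [pad_foldl, deficit_sum new2 m.length hle]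
      ring
    -- B's value
    have hB : solution_alt S = (stB.1 : Int) * (stB.2.1 : Int) - ((rest.length : Int) + 1) := by
      simp only [solution_alt, List.foldl_cons, ← hstB, PySem.Str.len_eq, hS,
        List.length_cons]
      push_cast; ring
    rw [hA, hB, hruns, hmaxL]
    have hmm : natMax (stA.1.map List.length ++ [stA.2.1.length]) = m.length := by
      rw [hkey, hnew2]; simp [List.map_append]
    rw [hmm, hsum]
    simp only [hnew2, List.length_append, List.length_cons, List.length_nil]
    push_cast; ring

-- ===== VERDICT (by name: the statement is the Claim_ definition above) =====
theorem solution_spec : Claim_equal_solution := by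
  intro S _ hpre
  unfold Spec_solution
  exact solution_eq S hpre
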